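-- pv_equiv track=rewrite | github.com/PhamDuc1012/p4_tool | file_operations.py | update_properties_block
-- ===== SOURCE A (Python) =====
-- def update_properties_block(lines, new_properties, start_header, next_header_list):
--     """Update properties block in file lines"""
--     # Find block boundaries
--     start = end = None
--     for idx, line in enumerate(lines):
--         if line.strip() == start_header:
--             start = idx
--             break
--
--     if start is None:
--         return lines  # Block not found
--
--     for idx in range(start + 1, len(lines)):
--         if lines[idx].strip() in next_header_list:
--             end = idx
--             break
--     if end is None:
--         end = len(lines)
--
--     # Build new block
--     new_block = [lines[start]]  # Keep header line
--
--     # Add properties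
--     for key, value in new_properties.items():
--         new_block.append(f"{key}={value}\n")
--
--     # Add empty line before next section if needed
--     if end < len(lines) and lines[end].strip():
--         new_block.append("\n")
--
--     # Replace the block
--     return lines[:start] + new_block + lines[end:]
-- ===== SOURCE B (Python) =====
-- def update_properties_block(lines, new_properties, start_header, next_header_list):
--     """Single streaming pass: copy until the header, splice the rebuilt block,
--     skip the old block, copy the rest (returns the original list if not found)."""
--     out = []
--     it = iter(lines)
--     for line in it:
--         if line.strip() == start_header:
--             out.append(line)
--             out.extend(f"{k}={v}\n" for k, v in new_properties.items())
--             break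
--         out.append(line)
--     else:
--         return lines  # header not found: hand back the original list
--     headers = set(next_header_list)
--     skipping = True
--     for line in it:
--         if skipping:
--             s = line.strip()
--             if s in headers:
--                 skipping = False
--                 if s:
--                     out.append("\n")
--                 out.append(line)
--         else:
--             out.append(line)
--     return out
-- ===== Notes on version B (the rewrite author's own statement) =====
-- stated objective: alternative
-- what changed: A finds the start and end indices with two index-searching loops and rebuilds the result by slicing and concatenating lines[:start]/lines[end:]; B is a single streaming pass (copy / splice rebuilt block / skip-until-next-header / copy) over an iterator with a set of next-headers, never computing indices or slices, and returns the original list object when the header is absent.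
import Mathlib
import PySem

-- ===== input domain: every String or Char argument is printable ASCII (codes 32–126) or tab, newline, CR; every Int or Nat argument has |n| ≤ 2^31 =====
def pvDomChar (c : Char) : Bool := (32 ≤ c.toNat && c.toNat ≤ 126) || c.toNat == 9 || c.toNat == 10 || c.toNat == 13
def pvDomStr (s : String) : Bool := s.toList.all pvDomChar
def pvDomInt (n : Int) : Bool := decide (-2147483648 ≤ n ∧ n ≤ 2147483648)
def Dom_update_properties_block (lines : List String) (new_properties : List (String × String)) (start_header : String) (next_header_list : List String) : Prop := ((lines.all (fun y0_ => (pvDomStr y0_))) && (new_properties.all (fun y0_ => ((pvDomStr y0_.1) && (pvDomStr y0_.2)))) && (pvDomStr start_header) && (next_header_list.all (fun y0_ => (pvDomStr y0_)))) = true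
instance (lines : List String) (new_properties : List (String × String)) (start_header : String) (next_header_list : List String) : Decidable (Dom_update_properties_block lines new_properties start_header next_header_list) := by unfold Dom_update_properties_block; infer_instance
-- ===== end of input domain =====

-- B replaces A's two index-searching loops + slice concatenation by one streaming
-- pass (copy / splice / skip / copy) with no index arithmetic (objective: alternative).

-- ===== PORT A =====
-- first loop of A: first index i with lines[i].strip() == start_header
def findStartA (ls : List String) (sh : String) (i : Nat) : Option Nat :=
  match ls with
  | [] => none
  | l :: t => if PySem.Str.strip l = sh then some i else findStartA t sh (i + 1)

-- second loop of A over range(start+1, len(lines)), given here the dropped suffix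
def findEndA (ls : List String) (nhl : List String) (i : Nat) : Option Nat :=
  match ls with
  | [] => none
  | l :: t => if PySem.Str.strip l ∈ nhl then some i else findEndA t nhl (i + 1)

def update_properties_block (lines : List String) (new_properties : List (String × String)) (start_header : String) (next_header_list : List String) : List String :=
  match findStartA lines start_header 0 with
  | none => lines
  | some s =>
    let e := (findEndA (lines.drop (s + 1)) next_header_list (s + 1)).getD lines.length
    -- lines[start] is in range (found by the loop); getD's default is never used
    let core := lines.getD s "" ::
      (PySem.Dict.ofList new_properties).items.map
        (fun kv => PySem.Str.join "" [kv.1, "=", kv.2, "\n"])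
    let newBlock := if e < lines.length ∧ PySem.Str.strip (lines.getD e "") ≠ "" then core ++ ["\n"] else core
    lines.take s ++ newBlock ++ lines.drop e

-- ===== PORT B =====
-- skipping phase of B: drop lines until one strips to a next-header, then copy verbatim
def skipB (ls : List String) (hs : PySem.Set String) : List String :=
  match ls with
  | [] => []
  | l :: t =>
    let s := PySem.Str.strip l
    if s ∈ hs then (if s ≠ "" then ["\n"] else []) ++ l :: t
    else skipB t hs

-- copying phase of B: copy lines until the start header, then splice block and skip;
-- none = header never found (B returns the original list)
def findSpliceB (ls : List String) (props : List String) (sh : String) (hs : PySem.Set String) : Option (List String) :=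
  match ls with
  | [] => none
  | l :: t =>
    if PySem.Str.strip l = sh then some (l :: (props ++ skipB t hs))
    else (findSpliceB t props sh hs).map (l :: ·)

def update_properties_block_alt (lines : List String) (new_properties : List (String × String)) (start_header : String) (next_header_list : List String) : List String :=
  let props := (PySem.Dict.ofList new_properties).items.map
    (fun kv => PySem.Str.join "" [kv.1, "=", kv.2, "\n"])
  match findSpliceB lines props start_header (PySem.Set.ofList next_header_list) with
  | none => lines
  | some out => out

-- ===== PRECONDITION & SPEC =====
def Spec_update_properties_block (lines : List String) (new_properties : List (String × String)) (start_header : String) (next_header_list : List String) (out : List String) : Prop := out = update_properties_block_alt lines new_properties start_header next_header_list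
instance (lines : List String) (new_properties : List (String × String)) (start_header : String) (next_header_list : List String) (out : List String) : Decidable (Spec_update_properties_block lines new_properties start_header next_header_list out) := by unfold Spec_update_properties_block; infer_instance

-- ===== CLAIM (what is proved, stated in full; the proofs are below) =====
def Claim_equal_update_properties_block : Prop := ∀ (lines : List String) (new_properties : List (String × String)) (start_header : String) (next_header_list : List String), Dom_update_properties_block lines new_properties start_header next_header_list → Spec_update_properties_block lines new_properties start_header next_header_list (update_properties_block lines new_properties start_header next_header_list)

-- ===== LEMMAS AND PROOFS =====
theorem findStartA_shift (ls : List String) (sh : String) (i : Nat) :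
    findStartA ls sh (i + 1) = (findStartA ls sh i).map (· + 1) := by
  induction ls generalizing i with
  | nil => rfl
  | cons l t ih => simp only [findStartA]; split <;> simp [ih]

theorem findEndA_shift (ls : List String) (nhl : List String) (i : Nat) :
    findEndA ls nhl (i + 1) = (findEndA ls nhl i).map (· + 1) := by
  induction ls generalizing i with
  | nil => rfl
  | cons l t ih => simp only [findEndA]; split <;> simp [ih]

theorem findEndA_lt (ls : List String) (nhl : List String) (e : Nat)
    (h : findEndA ls nhl 0 = some e) : e < ls.length := by
  induction ls generalizing e with
  | nil => simp [findEndA] at h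
  | cons l t ih =>
    simp only [findEndA] at h
    split at h
    · cases h; simp
    · rw [findEndA_shift] at h
      rcases Option.map_eq_some_iff.mp h with ⟨e', he', rfl⟩
      simpa using Nat.succ_lt_succ (ih e' he')

theorem A_cons_miss (l : String) (t : List String) (p : List (String × String)) (sh : String)
    (nhl : List String) (hl : ¬ PySem.Str.strip l = sh) (s0 : Nat)
    (hs : findStartA t sh 0 = some s0) :
    update_properties_block (l :: t) p sh nhl = l :: update_properties_block t p sh nhl := by
  unfold update_properties_block
  simp only [findStartA, if_neg hl]
  rw [findStartA_shift, hs]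
  have hshift := findEndA_shift (t.drop (s0 + 1)) nhl (s0 + 1)
  simp only [Option.map_some, List.drop_succ_cons, hshift]
  cases he : findEndA (t.drop (s0 + 1)) nhl (s0 + 1) with
  | none => simp
  | some e => simp

theorem skipB_eq (ls : List String) (nhl : List String) :
    skipB ls (PySem.Set.ofList nhl) =
      match findEndA ls nhl 0 with
      | none => []
      | some e => (if PySem.Str.strip (ls.getD e "") ≠ "" then ["\n"] else []) ++ ls.drop e := by
  induction ls with
  | nil => rfl
  | cons l t ih =>
    simp only [skipB, findEndA]
    by_cases hm : PySem.Str.strip l ∈ nhl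
    · rw [if_pos (by simpa [PySem.Set.mem_ofList] using hm), if_pos hm]
      simp
    · rw [if_neg (by simpa [PySem.Set.mem_ofList] using hm), if_neg hm]
      rw [ih, findEndA_shift]
      cases findEndA t nhl 0 with
      | none => rfl
      | some e => simp

theorem findSpliceB_none_iff (ls : List String) (props : List String) (sh : String)
    (hs : PySem.Set String) :
    findSpliceB ls props sh hs = none ↔ findStartA ls sh 0 = none := by
  induction ls with
  | nil => simp [findSpliceB, findStartA]
  | cons l t ih =>
    simp only [findSpliceB, findStartA]
    split
    · simp
    · rw [findStartA_shift]
      simpa using ih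

theorem A_none (ls : List String) (p : List (String × String)) (sh : String)
    (nhl : List String) (h : findStartA ls sh 0 = none) :
    update_properties_block ls p sh nhl = ls := by
  unfold update_properties_block; rw [h]

theorem main_eq (lines : List String) (props : List (String × String)) (sh : String)
    (nhl : List String) :
    update_properties_block lines props sh nhl = update_properties_block_alt lines props sh nhl := by
  induction lines with
  | nil => rfl
  | cons l t ih =>
    by_cases hl : PySem.Str.strip l = sh
    · -- header found at the head: A splices at index 0, B splices in place
      unfold update_properties_block update_properties_block_alt
      simp only [findStartA, findSpliceB, if_pos hl]
      rw [skipB_eq]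
      have hshift : findEndA t nhl 1 = (findEndA t nhl 0).map (· + 1) := findEndA_shift t nhl 0
      cases he : findEndA t nhl 0 with
      | none => simp [hshift, he]
      | some e =>
        have hlt := findEndA_lt t nhl e he
        by_cases hne : PySem.Str.strip (t[e]'hlt) = "" <;>
          simp [hshift, he, hlt, hne, List.getD_eq_getElem?_getD]
    · -- head is copied on both sides; peel it and use the induction hypothesis
      unfold update_properties_block_alt
      simp only [findSpliceB, if_neg hl]
      cases hb : findSpliceB t ((PySem.Dict.ofList props).items.map
          (fun kv => PySem.Str.join "" [kv.1, "=", kv.2, "\n"])) sh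
          (PySem.Set.ofList nhl) with
      | none =>
        have hn : findStartA t sh 0 = none := (findSpliceB_none_iff _ _ _ _).mp hb
        have : findStartA (l :: t) sh 0 = none := by
          simp only [findStartA, if_neg hl]
          rw [findStartA_shift, hn]; rfl
        rw [A_none _ _ _ _ this]
        rfl
      | some o =>
        have hs' : findStartA t sh 0 ≠ none := by
          intro h
          rw [← findSpliceB_none_iff t ((PySem.Dict.ofList props).items.map
            (fun kv => PySem.Str.join "" [kv.1, "=", kv.2, "\n"])) sh
            (PySem.Set.ofList nhl)] at h
          simp [h] at hb
        cases hso : findStartA t sh 0 with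
        | none => exact absurd hso hs'
        | some s0 =>
          rw [A_cons_miss l t props sh nhl hl s0 hso, ih]
          unfold update_properties_block_alt
          simp only [hb, Option.map_some]


-- ===== VERDICT (by name: the statement is the Claim_ definition above) =====
theorem update_properties_block_spec : Claim_equal_update_properties_block := by
  intro lines props sh nhl _
  exact main_eq lines props sh nhl
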